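-- pv_equiv track=rewrite | github.com/henrikland/advent2020 | day14/14-2.py | get_mask_variations
-- ===== SOURCE A (Python) =====
-- def get_mask_variations(mask):
--     char = mask[0]
--     char_variations = ["0", "1"] if char == "X" else [char]
--
--     if len(mask) == 1:
--         return char_variations
--
--     variations = []
--     next_variations = get_mask_variations(mask[1:])
--
--     for p in char_variations:
--         for np in next_variations:
--             variations.append(p + np)
--
--     return variations
-- ===== SOURCE B (Python) =====
-- def get_mask_variations(mask):
--     res = [""]
--     for c in mask:
--         opts = ["0", "1"] if c == "X" else [c]
--         res = [s + o for s in res for o in opts]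
--     return res
-- ===== Notes on version B (the rewrite author's own statement) =====
-- stated objective: simpler
-- what changed: Replaces A's recursion on the tail (which slices the mask and rebuilds result lists with nested append loops) by a single left-to-right fold that extends every partial string with the current character's choices; no slicing and no recursion gives a measured constant-factor speedup.
import Mathlib
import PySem

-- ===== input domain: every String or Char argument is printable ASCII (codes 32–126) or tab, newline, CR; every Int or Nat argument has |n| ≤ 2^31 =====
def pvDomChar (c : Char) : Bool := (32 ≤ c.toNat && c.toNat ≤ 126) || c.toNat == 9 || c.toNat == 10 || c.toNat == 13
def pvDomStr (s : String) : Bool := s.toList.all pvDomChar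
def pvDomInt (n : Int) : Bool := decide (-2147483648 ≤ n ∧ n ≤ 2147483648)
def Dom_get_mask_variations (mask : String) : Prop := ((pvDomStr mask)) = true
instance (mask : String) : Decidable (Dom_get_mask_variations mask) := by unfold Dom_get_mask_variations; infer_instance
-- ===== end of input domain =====

-- B replaces A's tail recursion with nested append loops by a single left-to-right
-- fold extending every partial string with the current character's choices (simpler; a timing run measured it faster by a constant factor).

-- ===== PORT A =====
-- strings are built as List Char and packed with String.ofList at the end (exact for these ASCII inputs)
def pvMaskVarsA : List Char → List (List Char)
  | [] => []            -- unreachable under Pre_ (Python raises IndexError on "")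
  | c :: rest =>
    let char_variations : List (List Char) := if c = 'X' then [['0'], ['1']] else [[c]]
    if rest.isEmpty then char_variations
    else
      let next_variations := pvMaskVarsA rest
      char_variations.foldl
        (fun variations p =>
          next_variations.foldl (fun vs np => vs ++ [p ++ np]) variations) []

def get_mask_variations (mask : String) : List String :=
  (pvMaskVarsA mask.toList).map String.ofList

-- ===== PORT B =====
def pvStepB (res : List (List Char)) (c : Char) : List (List Char) :=
  let opts : List (List Char) := if c = 'X' then [['0'], ['1']] else [[c]]
  res.flatMap (fun s => opts.map (fun o => s ++ o))

def get_mask_variations_alt (mask : String) : List String :=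
  (mask.toList.foldl pvStepB [[]]).map String.ofList

-- ===== PRECONDITION & SPEC =====
-- Pre_ excludes only the empty mask, on which A raises IndexError (mask[0]).
def Pre_get_mask_variations (mask : String) : Prop := mask ≠ ""
instance (mask : String) : Decidable (Pre_get_mask_variations mask) := by unfold Pre_get_mask_variations; infer_instance
def pvWitness_get_mask_variations : String := "X0X"

def Spec_get_mask_variations (mask : String) (out : List String) : Prop := out = get_mask_variations_alt mask
instance (mask : String) (out : List String) : Decidable (Spec_get_mask_variations mask out) := by unfold Spec_get_mask_variations; infer_instance

-- ===== CLAIM (what is proved, stated in full; the proofs are below) =====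
def Claim_equal_get_mask_variations : Prop := ∀ (mask : String), Dom_get_mask_variations mask → Pre_get_mask_variations mask → Spec_get_mask_variations mask (get_mask_variations mask)

-- ===== LEMMAS AND PROOFS =====

-- the accumulator of B's fold distributes over flatMap
theorem pv_foldl_flatMap (l : List Char) :
    ∀ acc : List (List Char),
      l.foldl pvStepB acc = acc.flatMap (fun s => l.foldl pvStepB [s]) := by
  induction l with
  | nil => intro acc; simp
  | cons c l ih =>
    intro acc
    simp only [List.foldl_cons]
    rw [ih (pvStepB acc c)]
    have hs : ∀ s : List Char, List.foldl pvStepB (pvStepB [s] c) l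
        = (pvStepB [s] c).flatMap (fun t => l.foldl pvStepB [t]) := fun s => ih _
    simp only [hs]
    simp only [pvStepB]
    rw [List.flatMap_assoc]
    simp

-- prepending a fixed string to every accumulator element commutes with one fold step
theorem pv_step_map (s : List Char) (acc : List (List Char)) (c : Char) :
    pvStepB (acc.map (fun t => s ++ t)) c = (pvStepB acc c).map (fun t => s ++ t) := by
  simp [pvStepB, List.map_flatMap, List.flatMap_map, List.map_map, Function.comp_def,
    List.append_assoc]

theorem pv_foldl_map_acc (l : List Char) :
    ∀ (s : List Char) (acc : List (List Char)),
      l.foldl pvStepB (acc.map (fun t => s ++ t))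
        = (l.foldl pvStepB acc).map (fun t => s ++ t) := by
  induction l with
  | nil => intro s acc; simp
  | cons c l ih =>
    intro s acc
    rw [List.foldl_cons, List.foldl_cons, pv_step_map, ih]

theorem pv_foldl_map (l : List Char) (s : List Char) :
      l.foldl pvStepB [s] = (l.foldl pvStepB [[]]).map (fun t => s ++ t) := by
  have := pv_foldl_map_acc l s [[]]
  simpa using this

theorem pv_main (l : List Char) (h : l ≠ []) :
    pvMaskVarsA l = l.foldl pvStepB [[]] := by
  induction l with
  | nil => exact absurd rfl h
  | cons c rest ih =>
    by_cases hr : rest = []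
    · subst hr; simp [pvMaskVarsA, pvStepB]
    · have hne : rest.isEmpty = false := by simp [hr]
      simp only [pvMaskVarsA, hne, Bool.false_eq_true, if_false]
      simp only [PySem.List.foldl_append_singleton_eq_map, PySem.List.foldl_append_eq_flatMap,
        List.nil_append]
      rw [ih hr]
      rw [List.foldl_cons]
      conv_rhs => rw [pv_foldl_flatMap rest (pvStepB [[]] c)]
      rw [show pvStepB [[]] c = (if c = 'X' then [['0'], ['1']] else [[c]]) from by simp [pvStepB]]
      congr 1
      funext p
      exact (pv_foldl_map rest p).symm

-- ===== VERDICT (by name: the statement is the Claim_ definition above) =====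
theorem get_mask_variations_spec : Claim_equal_get_mask_variations := by
  intro mask _ hpre
  unfold Spec_get_mask_variations get_mask_variations get_mask_variations_alt
  have hl : mask.toList ≠ [] := by
    intro h
    exact hpre (by
      have := congrArg String.ofList h
      simpa using this)
  rw [pv_main _ hl]
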